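-- pv_equiv track=rewrite | github.com/MohitS3thi/Travel-Planner | trips/ai_planner.py | _packing_suggestions
-- ===== SOURCE A (Python) =====
-- def _packing_suggestions(weather_summary, style_text):
--     weather_text = (weather_summary or '').lower()
--     style_text = (style_text or '').lower()
--
--     suggestions = [
--         'Carry digital and printed copies of IDs, bookings, and emergency contacts.',
--         'Keep one power bank and a universal charging setup ready before departure.',
--     ]
--
--     if any(word in weather_text for word in ('rain', 'storm', 'showers')):
--         suggestions.append('Pack a compact umbrella, waterproof pouch, and quick-dry layers.')
--     if any(word in weather_text for word in ('hot', 'heat', 'sunny', 'humid')):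
--         suggestions.append('Pack breathable clothing, sunscreen, sunglasses, and a refillable bottle.')
--     if any(word in weather_text for word in ('cold', 'snow', 'wind', 'chill')):
--         suggestions.append('Pack thermal layers, gloves, and weatherproof walking shoes.')
--
--     if 'adventure' in style_text:
--         suggestions.append('Include a daypack, first-aid kit, and activity-specific safety gear.')
--     if 'family' in style_text:
--         suggestions.append('Keep snacks, basic medicines, and spare clothing in an easy-access bag.')
--     if 'food' in style_text:
--         suggestions.append('Reserve at least two high-demand restaurants in advance.')
--
--     return suggestions
-- ===== SOURCE B (Python) =====
-- _BASE = [
--     'Carry digital and printed copies of IDs, bookings, and emergency contacts.',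
--     'Keep one power bank and a universal charging setup ready before departure.',
-- ]
--
-- _TIPS = [
--     'Pack a compact umbrella, waterproof pouch, and quick-dry layers.',
--     'Pack breathable clothing, sunscreen, sunglasses, and a refillable bottle.',
--     'Pack thermal layers, gloves, and weatherproof walking shoes.',
--     'Include a daypack, first-aid kit, and activity-specific safety gear.',
--     'Keep snacks, basic medicines, and spare clothing in an easy-access bag.',
--     'Reserve at least two high-demand restaurants in advance.',
-- ]
--
-- # keyword -> index of the tip it triggers
-- _WEATHER_KW = [('rain', 0), ('storm', 0), ('showers', 0),
--                ('hot', 1), ('heat', 1), ('sunny', 1), ('humid', 1),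
--                ('cold', 2), ('snow', 2), ('wind', 2), ('chill', 2)]
-- _STYLE_KW = [('adventure', 3), ('family', 4), ('food', 5)]
--
--
-- def _scan(text, kwmap):
--     # multi-pattern scan: walk the text once over positions, collect the
--     # indices of every keyword that starts at some position
--     found = set()
--     for i in range(len(text)):
--         for kw, idx in kwmap:
--             if text.startswith(kw, i):
--                 found.add(idx)
--     return found
--
--
-- def _packing_suggestions(weather_summary, style_text):
--     weather = (weather_summary or '').lower()
--     style = (style_text or '').lower()
--     found = _scan(weather, _WEATHER_KW) | _scan(style, _STYLE_KW)
--     return _BASE + [tip for i, tip in enumerate(_TIPS) if i in found]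
-- ===== Notes on version B (the rewrite author's own statement) =====
-- stated objective: alternative
-- what changed: Instead of six straight-line any-substring-in-text checks, B runs a multi-pattern position scan: it walks each text once over all start positions, collects into a set the tip indices of every keyword starting there (keyword->index table), and finally emits base tips plus the tips whose index landed in the set.
import Mathlib
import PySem

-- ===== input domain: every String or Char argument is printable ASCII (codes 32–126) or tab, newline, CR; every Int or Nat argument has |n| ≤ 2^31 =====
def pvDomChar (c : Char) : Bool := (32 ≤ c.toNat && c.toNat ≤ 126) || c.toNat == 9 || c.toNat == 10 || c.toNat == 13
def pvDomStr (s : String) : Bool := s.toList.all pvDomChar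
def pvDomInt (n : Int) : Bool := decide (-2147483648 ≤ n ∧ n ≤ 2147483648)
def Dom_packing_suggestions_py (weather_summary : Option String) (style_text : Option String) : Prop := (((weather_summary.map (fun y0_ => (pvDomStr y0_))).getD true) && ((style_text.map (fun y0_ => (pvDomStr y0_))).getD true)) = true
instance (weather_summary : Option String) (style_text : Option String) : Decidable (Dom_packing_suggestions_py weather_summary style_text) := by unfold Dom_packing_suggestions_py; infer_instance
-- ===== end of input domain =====

-- B replaces A's per-keyword substring tests by a position scan of each text that
-- collects the indices of all keywords matching somewhere into a set, then emits
-- the tips whose index was found (objective: alternative; same output).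

-- ===== PORT A =====
-- Python's `x or ''` on a string option: None and '' both give ''.
def pvOrEmpty (o : Option String) : String := match o with
  | none => ""
  | some s => if s = "" then "" else s

def packing_suggestions_py (weather_summary : Option String) (style_text : Option String) : List String :=
  let weather_text := PySem.Str.lower (pvOrEmpty weather_summary)
  let style_text' := PySem.Str.lower (pvOrEmpty style_text)
  let suggestions : List String :=
    [ "Carry digital and printed copies of IDs, bookings, and emergency contacts.",
      "Keep one power bank and a universal charging setup ready before departure." ]
  let suggestions := if (["rain", "storm", "showers"].any (fun word => PySem.Str.isIn word weather_text)) then suggestions ++ ["Pack a compact umbrella, waterproof pouch, and quick-dry layers."] else suggestions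
  let suggestions := if (["hot", "heat", "sunny", "humid"].any (fun word => PySem.Str.isIn word weather_text)) then suggestions ++ ["Pack breathable clothing, sunscreen, sunglasses, and a refillable bottle."] else suggestions
  let suggestions := if (["cold", "snow", "wind", "chill"].any (fun word => PySem.Str.isIn word weather_text)) then suggestions ++ ["Pack thermal layers, gloves, and weatherproof walking shoes."] else suggestions
  let suggestions := if PySem.Str.isIn "adventure" style_text' then suggestions ++ ["Include a daypack, first-aid kit, and activity-specific safety gear."] else suggestions
  let suggestions := if PySem.Str.isIn "family" style_text' then suggestions ++ ["Keep snacks, basic medicines, and spare clothing in an easy-access bag."] else suggestions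
  let suggestions := if PySem.Str.isIn "food" style_text' then suggestions ++ ["Reserve at least two high-demand restaurants in advance."] else suggestions
  suggestions

-- ===== PORT B =====
def pvBase : List String :=
  [ "Carry digital and printed copies of IDs, bookings, and emergency contacts.",
    "Keep one power bank and a universal charging setup ready before departure." ]

def pvTips : List String :=
  [ "Pack a compact umbrella, waterproof pouch, and quick-dry layers.",
    "Pack breathable clothing, sunscreen, sunglasses, and a refillable bottle.",
    "Pack thermal layers, gloves, and weatherproof walking shoes.",
    "Include a daypack, first-aid kit, and activity-specific safety gear.",
    "Keep snacks, basic medicines, and spare clothing in an easy-access bag.",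
    "Reserve at least two high-demand restaurants in advance." ]

-- keyword -> index of the tip it triggers (keywords as their character lists)
def pvWeatherKw : List (List Char × Int) :=
  [ (['r','a','i','n'], 0), (['s','t','o','r','m'], 0), (['s','h','o','w','e','r','s'], 0),
    (['h','o','t'], 1), (['h','e','a','t'], 1), (['s','u','n','n','y'], 1), (['h','u','m','i','d'], 1),
    (['c','o','l','d'], 2), (['s','n','o','w'], 2), (['w','i','n','d'], 2), (['c','h','i','l','l'], 2) ]

def pvStyleKw : List (List Char × Int) :=
  [ (['a','d','v','e','n','t','u','r','e'], 3), (['f','a','m','i','l','y'], 4), (['f','o','o','d'], 5) ]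

-- Source B's _scan: `text.startswith(kw, i)` with 0 ≤ i < len(text) is exactly
-- `startswith` of the suffix `text[i:]` (PySem.Chars.startswith on `drop`; exact here).
def pvScan (text : List Char) (kwmap : List (List Char × Int)) : PySem.Set Int :=
  (PySem.List.pyRange 0 text.length 1).foldl
    (fun found i =>
      kwmap.foldl
        (fun f kv => if PySem.Chars.startswith (text.drop i.toNat) kv.1 then PySem.Set.add f kv.2 else f)
        found)
    PySem.Set.empty

def packing_suggestions_py_alt (weather_summary : Option String) (style_text : Option String) : List String :=
  let weather := (PySem.Str.lower (pvOrEmpty weather_summary)).toList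
  let style := (PySem.Str.lower (pvOrEmpty style_text)).toList
  let found := PySem.Set.union (pvScan weather pvWeatherKw) (pvScan style pvStyleKw)
  pvBase ++ ((PySem.List.enumerate pvTips).filter (fun p => PySem.Set.contains found p.1)).map (fun p => p.2)

-- ===== PRECONDITION & SPEC =====
def Spec_packing_suggestions_py (weather_summary : Option String) (style_text : Option String) (out : List String) : Prop := out = packing_suggestions_py_alt weather_summary style_text
instance (weather_summary : Option String) (style_text : Option String) (out : List String) : Decidable (Spec_packing_suggestions_py weather_summary style_text out) := by unfold Spec_packing_suggestions_py; infer_instance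

-- ===== CLAIM (what is proved, stated in full; the proofs are below) =====
def Claim_equal_packing_suggestions_py : Prop := ∀ (weather_summary : Option String) (style_text : Option String), Dom_packing_suggestions_py weather_summary style_text → Spec_packing_suggestions_py weather_summary style_text (packing_suggestions_py weather_summary style_text)

-- ===== LEMMAS AND PROOFS =====

-- membership after the inner keyword loop of pvScan
theorem pv_mem_inner (text : List Char) (i : Int) (kwmap : List (List Char × Int))
    (f : PySem.Set Int) (idx : Int) :
    (idx ∈ kwmap.foldl
        (fun f kv => if PySem.Chars.startswith (text.drop i.toNat) kv.1 then PySem.Set.add f kv.2 else f) f)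
      ↔ idx ∈ f ∨ ∃ kv ∈ kwmap, PySem.Chars.startswith (text.drop i.toNat) kv.1 = true ∧ kv.2 = idx := by
  induction kwmap generalizing f with
  | nil => simp
  | cons kv t ih =>
    simp only [List.foldl_cons]
    by_cases h : PySem.Chars.startswith (text.drop i.toNat) kv.1 = true
    · rw [if_pos h, ih]
      simp only [PySem.Set.mem_add, List.mem_cons]
      constructor
      · rintro ((hf | he) | ⟨kv', h1, h2, h3⟩)
        · exact Or.inl hf
        · exact Or.inr ⟨kv, Or.inl rfl, h, he.symm⟩
        · exact Or.inr ⟨kv', Or.inr h1, h2, h3⟩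
      · rintro (hf | ⟨kv', (rfl | h1), h2, h3⟩)
        · exact Or.inl (Or.inl hf)
        · exact Or.inl (Or.inr h3.symm)
        · exact Or.inr ⟨kv', h1, h2, h3⟩
    · rw [if_neg h, ih]
      constructor
      · rintro (hf | ⟨kv', h1, h2, h3⟩)
        · exact Or.inl hf
        · exact Or.inr ⟨kv', List.mem_cons_of_mem _ h1, h2, h3⟩
      · rintro (hf | ⟨kv', h1, h2, h3⟩)
        · exact Or.inl hf
        · rcases List.mem_cons.mp h1 with rfl | h1
          · exact absurd h2 h
          · exact Or.inr ⟨kv', h1, h2, h3⟩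

-- membership in a pvScan-shaped fold over any list of positions
theorem pv_mem_outer (text : List Char) (kwmap : List (List Char × Int))
    (is : List Int) (f : PySem.Set Int) (idx : Int) :
    (idx ∈ is.foldl
        (fun found i =>
          kwmap.foldl
            (fun f kv => if PySem.Chars.startswith (text.drop i.toNat) kv.1 then PySem.Set.add f kv.2 else f)
            found) f)
      ↔ idx ∈ f ∨ ∃ i ∈ is, ∃ kv ∈ kwmap, PySem.Chars.startswith (text.drop i.toNat) kv.1 = true ∧ kv.2 = idx := by
  induction is generalizing f with
  | nil => simp
  | cons i t ih =>
    simp only [List.foldl_cons]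
    rw [ih, pv_mem_inner]
    constructor
    · rintro ((hf | ⟨kv, h1, h2, h3⟩) | ⟨j, hj, kv, h1, h2, h3⟩)
      · exact Or.inl hf
      · exact Or.inr ⟨i, List.mem_cons_self, kv, h1, h2, h3⟩
      · exact Or.inr ⟨j, List.mem_cons_of_mem _ hj, kv, h1, h2, h3⟩
    · rintro (hf | ⟨j, hj, kv, h1, h2, h3⟩)
      · exact Or.inl (Or.inl hf)
      · rcases List.mem_cons.mp hj with rfl | hj
        · exact Or.inl (Or.inr ⟨kv, h1, h2, h3⟩)
        · exact Or.inr ⟨j, hj, kv, h1, h2, h3⟩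

theorem pv_mem_scan (text : List Char) (kwmap : List (List Char × Int)) (idx : Int) :
    idx ∈ pvScan text kwmap
      ↔ ∃ kv ∈ kwmap, kv.2 = idx ∧ ∃ i : Nat, i < text.length ∧ PySem.Chars.startswith (text.drop i) kv.1 = true := by
  unfold pvScan
  rw [pv_mem_outer]
  constructor
  · rintro (h | ⟨i, hi, kv, h1, h2, h3⟩)
    · simp [PySem.Set.empty] at h
    · rw [PySem.List.mem_pyRange_one] at hi
      exact ⟨kv, h1, h3, i.toNat, by omega, h2⟩
  · rintro ⟨kv, h1, h3, i, hi, h2⟩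
    refine Or.inr ⟨(i : Int), ?_, kv, h1, ?_, h3⟩
    · rw [PySem.List.mem_pyRange_one]; omega
    · simpa using h2

-- a nonempty keyword starts at some position of the text iff it is a substring
theorem pv_scan_hit (text kw : List Char) (hk : kw ≠ []) :
    (∃ i : Nat, i < text.length ∧ PySem.Chars.startswith (text.drop i) kw = true)
      ↔ PySem.Chars.isIn kw text = true := by
  rw [← PySem.Chars.exists_prefix_drop_iff_isIn]
  constructor
  · rintro ⟨i, _, hs⟩
    exact ⟨i, (PySem.Chars.startswith_iff _ _).mp hs⟩
  · rintro ⟨j, hp⟩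
    have hkpos : 0 < kw.length := by
      cases kw with
      | nil => exact absurd rfl hk
      | cons a t => simp
    have hlen : kw.length ≤ text.length - j := by
      simpa [List.length_drop] using hp.length_le
    exact ⟨j, by omega, (PySem.Chars.startswith_iff _ _).mpr hp⟩

-- pvScan's set holds idx iff some keyword mapped to idx occurs in the text
theorem pv_scan_mem_isIn (text : List Char) (kwmap : List (List Char × Int))
    (h : ∀ kv ∈ kwmap, kv.1 ≠ []) (idx : Int) :
    idx ∈ pvScan text kwmap ↔ ∃ kv ∈ kwmap, kv.2 = idx ∧ PySem.Chars.isIn kv.1 text = true := by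
  rw [pv_mem_scan]
  constructor
  · rintro ⟨kv, h1, h2, h3⟩
    exact ⟨kv, h1, h2, (pv_scan_hit text kv.1 (h kv h1)).mp h3⟩
  · rintro ⟨kv, h1, h2, h3⟩
    exact ⟨kv, h1, h2, (pv_scan_hit text kv.1 (h kv h1)).mpr h3⟩

-- ===== VERDICT (by name: the statement is the Claim_ definition above) =====
theorem packing_suggestions_py_spec : Claim_equal_packing_suggestions_py := by
  intro weather_summary style_text _
  unfold Spec_packing_suggestions_py packing_suggestions_py packing_suggestions_py_alt
  simp only []
  set W := PySem.Str.lower (pvOrEmpty weather_summary) with hWdef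
  set S := PySem.Str.lower (pvOrEmpty style_text) with hSdef
  set F := PySem.Set.union (pvScan W.toList pvWeatherKw) (pvScan S.toList pvStyleKw) with hFdef
  have hmem : ∀ idx : Int, idx ∈ F ↔
      (∃ kv ∈ pvWeatherKw, kv.2 = idx ∧ PySem.Chars.isIn kv.1 W.toList = true) ∨
      (∃ kv ∈ pvStyleKw, kv.2 = idx ∧ PySem.Chars.isIn kv.1 S.toList = true) := by
    intro idx
    rw [hFdef, PySem.Set.mem_union,
        pv_scan_mem_isIn _ _ (by decide), pv_scan_mem_isIn _ _ (by decide)]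
  have h0 : (PySem.Chars.isIn "rain".toList W.toList = true ∨ PySem.Chars.isIn "storm".toList W.toList = true ∨ PySem.Chars.isIn "showers".toList W.toList = true) ↔ ((0:Int) ∈ F) := by
    rw [hmem]; simp [pvWeatherKw, pvStyleKw]
  have h1 : (PySem.Chars.isIn "hot".toList W.toList = true ∨ PySem.Chars.isIn "heat".toList W.toList = true ∨ PySem.Chars.isIn "sunny".toList W.toList = true ∨ PySem.Chars.isIn "humid".toList W.toList = true) ↔ ((1:Int) ∈ F) := by
    rw [hmem]; simp [pvWeatherKw, pvStyleKw]
  have h2 : (PySem.Chars.isIn "cold".toList W.toList = true ∨ PySem.Chars.isIn "snow".toList W.toList = true ∨ PySem.Chars.isIn "wind".toList W.toList = true ∨ PySem.Chars.isIn "chill".toList W.toList = true) ↔ ((2:Int) ∈ F) := by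
    rw [hmem]; simp [pvWeatherKw, pvStyleKw]
  have h3 : (PySem.Chars.isIn "adventure".toList S.toList = true) ↔ ((3:Int) ∈ F) := by
    rw [hmem]; simp [pvWeatherKw, pvStyleKw]
  have h4 : (PySem.Chars.isIn "family".toList S.toList = true) ↔ ((4:Int) ∈ F) := by
    rw [hmem]; simp [pvWeatherKw, pvStyleKw]
  have h5 : (PySem.Chars.isIn "food".toList S.toList = true) ↔ ((5:Int) ∈ F) := by
    rw [hmem]; simp [pvWeatherKw, pvStyleKw]
  simp only [pvTips, PySem.List.enumerate_cons, PySem.List.enumerate_nil,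
    List.filter_cons, List.filter_nil, PySem.Set.contains_iff]
  norm_num
  simp only [h0, h1, h2, h3, h4, h5]
  by_cases c0 : (0:Int) ∈ F <;> by_cases c1 : (1:Int) ∈ F <;> by_cases c2 : (2:Int) ∈ F <;>
    by_cases c3 : (3:Int) ∈ F <;> by_cases c4 : (4:Int) ∈ F <;> by_cases c5 : (5:Int) ∈ F <;>
    simp [c0, c1, c2, c3, c4, c5, pvBase]
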